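-- pv_equiv track=rewrite | github.com/TheMattBin/3D-Geological-Modeling | src/borehole/ags_reading.py | build_dict
-- ===== SOURCE A (Python) =====
-- from typing import List, Dict, Any
--
-- def build_dict(data: List[List[str]], keywords: List[str]) -> Dict[str, List[Any]]:
--     d = {}
--     for kwi in keywords:
--         kws = kwi.replace('*', '')
--         kw_cid = [i for i, hd in enumerate(data[1]) if kwi in hd][0]
--         kw_info = [hd[kw_cid] for hd in data[2:len(data)]]
--         d[kws] = kw_info
--     return d
-- ===== SOURCE B (Python) =====
-- def build_dict(data, keywords):
--     table = {}
--     for kwi in keywords: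
--         table[kwi.replace('*', '')] = [i for i, hd in enumerate(data[1]) if kwi in hd][0]
--     result = {k: [] for k in table}
--     for row in data[2:len(data)]:
--         for k, c in table.items():
--             result[k].append(row[c])
--     return result
-- ===== Notes on version B (the rewrite author's own statement) =====
-- stated objective: alternative
-- what changed: A extracts each keyword's column by a separate pass over the data rows; B first builds a keyword->column-index table (later duplicate stripped keys overwrite the index, keeping first-insertion order) and then fills all result lists in a single row-major pass over data[2:], also computing each surviving column only once when duplicate keywords strip to the same key.
import Mathlib
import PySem

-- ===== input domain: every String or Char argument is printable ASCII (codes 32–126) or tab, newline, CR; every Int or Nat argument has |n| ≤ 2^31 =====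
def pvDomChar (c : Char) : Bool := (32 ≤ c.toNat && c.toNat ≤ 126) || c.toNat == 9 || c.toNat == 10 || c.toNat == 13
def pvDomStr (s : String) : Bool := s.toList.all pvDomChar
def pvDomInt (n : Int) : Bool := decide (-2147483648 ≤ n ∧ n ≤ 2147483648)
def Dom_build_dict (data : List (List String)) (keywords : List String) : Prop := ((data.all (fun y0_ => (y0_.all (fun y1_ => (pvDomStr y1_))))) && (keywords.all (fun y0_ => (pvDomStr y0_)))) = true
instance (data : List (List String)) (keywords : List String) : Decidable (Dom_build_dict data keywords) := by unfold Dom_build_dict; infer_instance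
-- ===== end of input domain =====

-- B replaces A's per-keyword column extraction by a precomputed keyword→column index table
-- followed by a single row-major fan-out pass over the data rows (objective: alternative decomposition).

-- ===== PORT A =====
def build_dict (data : List (List String)) (keywords : List String) : List (String × List String) :=
  (keywords.foldl (fun d kwi =>
      let kws := PySem.Str.replace kwi "*" ""
      match PySem.List.pyGet?
          ((PySem.List.enumerate ((PySem.List.pyGet? data 1).getD [])).filter
            (fun p => PySem.Str.isIn kwi p.2)) 0 with
      | some (kw_cid, _) =>
          let kw_info := (PySem.List.slice data (some 2) (some (data.length : Int))).map
              (fun hd => (PySem.List.pyGet? hd kw_cid).getD "")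
          d.insert kws kw_info
      | none => d)   -- Python raises IndexError here; excluded by Pre_build_dict
    PySem.Dict.empty).items

-- ===== PORT B =====
def build_dict_alt (data : List (List String)) (keywords : List String) : List (String × List String) :=
  let table : PySem.Dict String Int := keywords.foldl (fun t kwi =>
      match PySem.List.pyGet?
          ((PySem.List.enumerate ((PySem.List.pyGet? data 1).getD [])).filter
            (fun p => PySem.Str.isIn kwi p.2)) 0 with
      | some (c, _) => t.insert (PySem.Str.replace kwi "*" "") c
      | none => t)   -- Python raises IndexError here; excluded by Pre_build_dict
    PySem.Dict.empty
  let result0 : PySem.Dict String (List String) :=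
    table.keys.foldl (fun r k => r.insert k ([] : List String)) PySem.Dict.empty
  let result := (PySem.List.slice data (some 2) (some (data.length : Int))).foldl
      (fun res row => table.items.foldl
        (fun res p => res.modify p.1 [] (fun l => l ++ [(PySem.List.pyGet? row p.2).getD ""]))
        res) result0
  result.items

-- ===== PRECONDITION & SPEC =====
-- Pre_: exactly the inputs where Python A returns: every keyword occurs as a substring of some
-- header cell in data[1] (so data needs at least 2 entries when keywords is nonempty), and the
-- first matching header index is a valid index into every data row below the header.
def Pre_build_dict (data : List (List String)) (keywords : List String) : Prop :=
  ∀ kwi ∈ keywords, 2 ≤ data.length ∧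
    ((data.getD 1 []).findIdx? (fun hd => PySem.Str.isIn kwi hd)).isSome = true ∧
    ∀ row ∈ data.drop 2,
      ((((data.getD 1 []).findIdx? (fun hd => PySem.Str.isIn kwi hd)).getD 0 : Int) < row.length)
instance (data : List (List String)) (keywords : List String) : Decidable (Pre_build_dict data keywords) := by unfold Pre_build_dict; infer_instance

def pvWitness_build_dict : List (List String) × List String :=
  ([[], ["AA", "BB"], ["1", "2"], ["3", "4"]], ["AA", "BB"])

def Spec_build_dict (data : List (List String)) (keywords : List String) (out : List (String × List String)) : Prop := out = build_dict_alt data keywords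
instance (data : List (List String)) (keywords : List String) (out : List (String × List String)) : Decidable (Spec_build_dict data keywords out) := by unfold Spec_build_dict; infer_instance

-- ===== CLAIM (what is proved, stated in full; the proofs are below) =====
def Claim_equal_build_dict : Prop := ∀ (data : List (List String)) (keywords : List String), Dom_build_dict data keywords → Pre_build_dict data keywords → Spec_build_dict data keywords (build_dict data keywords)

-- ===== LEMMAS AND PROOFS =====

-- shared abbreviations (proof-side only)
def pvPick (data : List (List String)) (kwi : String) : Option (Int × String) :=
  PySem.List.pyGet?
    ((PySem.List.enumerate ((PySem.List.pyGet? data 1).getD [])).filter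
      (fun p => PySem.Str.isIn kwi p.2)) 0

def pvRows (data : List (List String)) : List (List String) :=
  PySem.List.slice data (some 2) (some (data.length : Int))

def pvCol (data : List (List String)) (c : Int) : List String :=
  (pvRows data).map (fun hd => (PySem.List.pyGet? hd c).getD "")

def pvA (data : List (List String)) (keywords : List String) : PySem.Dict String (List String) :=
  keywords.foldl (fun d kwi =>
    match pvPick data kwi with
    | some (c, _) => d.insert (PySem.Str.replace kwi "*" "") (pvCol data c)
    | none => d) PySem.Dict.empty

def pvT (data : List (List String)) (keywords : List String) : PySem.Dict String Int :=
  keywords.foldl (fun t kwi =>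
    match pvPick data kwi with
    | some (c, _) => t.insert (PySem.Str.replace kwi "*" "") c
    | none => t) PySem.Dict.empty

def pvR0 (data : List (List String)) (keywords : List String) : PySem.Dict String (List String) :=
  (pvT data keywords).keys.foldl (fun r k => r.insert k ([] : List String)) PySem.Dict.empty

def pvStepRow (data : List (List String)) (keywords : List String)
    (res : PySem.Dict String (List String)) (row : List String) : PySem.Dict String (List String) :=
  (pvT data keywords).items.foldl
    (fun res p => res.modify p.1 [] (fun l => l ++ [(PySem.List.pyGet? row p.2).getD ""])) res

theorem pvA_eq (data : List (List String)) (keywords : List String) :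
    build_dict data keywords = (pvA data keywords).items := rfl

theorem pvB_eq (data : List (List String)) (keywords : List String) :
    build_dict_alt data keywords =
      ((pvRows data).foldl (pvStepRow data keywords) (pvR0 data keywords)).items := rfl

theorem pvT_nodup (data : List (List String)) (keywords : List String) :
    (pvT data keywords).keys.Nodup := by
  unfold pvT
  induction keywords using List.reverseRecOn with
  | nil => exact PySem.Dict.nodup_keys_empty
  | append_singleton ks kwi ih =>
      rw [List.foldl_append, List.foldl_cons, List.foldl_nil]
      cases pvPick data kwi with
      | some p =>
          cases p with
          | mk c s => exact PySem.Dict.nodup_keys_insert _ _ _ ih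
      | none => exact ih

theorem pvA_keys (data : List (List String)) (keywords : List String) :
    (pvA data keywords).keys = (pvT data keywords).keys := by
  unfold pvA pvT
  have h : ∀ (ks : List String) (d : PySem.Dict String (List String)) (t : PySem.Dict String Int),
      d.keys = t.keys →
      (ks.foldl (fun d kwi =>
        match pvPick data kwi with
        | some (c, _) => d.insert (PySem.Str.replace kwi "*" "") (pvCol data c)
        | none => d) d).keys =
      (ks.foldl (fun t kwi =>
        match pvPick data kwi with
        | some (c, _) => t.insert (PySem.Str.replace kwi "*" "") c
        | none => t) t).keys := by
    intro ks
    induction ks with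
    | nil => intro d t h; simpa using h
    | cons kwi rest ih =>
        intro d t h
        rw [List.foldl_cons, List.foldl_cons]
        cases hp : pvPick data kwi with
        | none => exact ih _ _ h
        | some p =>
            cases p with
            | mk c s =>
                apply ih
                have hc : d.contains (PySem.Str.replace kwi "*" "") =
                    t.contains (PySem.Str.replace kwi "*" "") := by
                  rw [PySem.Dict.contains_eq_decide_mem_keys, PySem.Dict.contains_eq_decide_mem_keys, h]
                by_cases hmem : t.contains (PySem.Str.replace kwi "*" "") = true
                · rw [PySem.Dict.keys_insert_of_contains _ _ (hc.trans hmem),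
                      PySem.Dict.keys_insert_of_contains _ _ hmem, h]
                · have hf : t.contains (PySem.Str.replace kwi "*" "") = false :=
                    Bool.eq_false_iff.mpr hmem
                  rw [PySem.Dict.keys_insert_of_not_contains _ _ (hc.trans hf),
                      PySem.Dict.keys_insert_of_not_contains _ _ hf, h]
  exact h keywords PySem.Dict.empty PySem.Dict.empty rfl

theorem pvA_get? (data : List (List String)) (keywords : List String) (k : String) :
    (pvA data keywords).get? k = ((pvT data keywords).get? k).map (pvCol data) := by
  unfold pvA pvT
  have h : ∀ (ks : List String) (d : PySem.Dict String (List String)) (t : PySem.Dict String Int),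
      (∀ k, d.get? k = (t.get? k).map (pvCol data)) →
      ∀ k, (ks.foldl (fun d kwi =>
        match pvPick data kwi with
        | some (c, _) => d.insert (PySem.Str.replace kwi "*" "") (pvCol data c)
        | none => d) d).get? k =
      ((ks.foldl (fun t kwi =>
        match pvPick data kwi with
        | some (c, _) => t.insert (PySem.Str.replace kwi "*" "") c
        | none => t) t).get? k).map (pvCol data) := by
    intro ks
    induction ks with
    | nil => intro d t h k; exact h k
    | cons kwi rest ih =>
        intro d t h k
        rw [List.foldl_cons, List.foldl_cons]
        cases hp : pvPick data kwi with
        | none => exact ih _ _ h k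
        | some p =>
            cases p with
            | mk c s =>
                apply ih
                intro k'
                rw [PySem.Dict.get?_insert, PySem.Dict.get?_insert]
                by_cases hk : k' = PySem.Str.replace kwi "*" ""
                · simp [hk]
                · simp [hk, h k']
  exact h keywords PySem.Dict.empty PySem.Dict.empty (fun k => by simp [PySem.Dict.get?_empty]) k

theorem pvR0_items (data : List (List String)) (keywords : List String) :
    (pvR0 data keywords).items = (pvT data keywords).keys.map (fun k => (k, ([] : List String))) := by
  unfold pvR0
  have := PySem.Dict.items_foldl_insert_fresh (pvT data keywords).keys (fun a => a)
    (fun _ => ([] : List String)) PySem.Dict.empty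
    (fun a _ => PySem.Dict.contains_empty a)
    (by simpa using pvT_nodup data keywords)
  simpa using this

theorem pvR0_keys (data : List (List String)) (keywords : List String) :
    (pvR0 data keywords).keys = (pvT data keywords).keys := by
  show (pvR0 data keywords).items.map (fun p => p.1) = _
  rw [pvR0_items, List.map_map]
  have hc : ((fun p : String × List String => p.1) ∘ fun k => (k, ([] : List String))) = fun k => k := rfl
  rw [hc]
  simp

theorem pvR0_getD (data : List (List String)) (keywords : List String) (k : String) :
    (pvR0 data keywords).getD k [] = [] := by
  by_cases hmem : k ∈ (pvT data keywords).keys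
  · have hitem : (k, ([] : List String)) ∈ (pvR0 data keywords).items := by
      rw [pvR0_items]
      exact List.mem_map.mpr ⟨k, hmem, rfl⟩
    have hnd : (pvR0 data keywords).keys.Nodup := by
      rw [pvR0_keys]; exact pvT_nodup data keywords
    exact PySem.Dict.getD_of_mem_items _ hitem hnd []
  · apply PySem.Dict.getD_of_not_contains
    rw [PySem.Dict.contains_eq_decide_mem_keys]
    simp [pvR0_keys, hmem]

theorem pvSet_update_self (s xs : List String) (h : ∀ x ∈ xs, x ∈ s) :
    PySem.Set.update s xs = s := by
  rw [PySem.Set.update_eq_append_filter]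
  have : List.filter (fun y => !PySem.Set.contains s y) (PySem.Set.ofList xs) = [] := by
    apply List.filter_eq_nil_iff.mpr
    intro y hy
    have hys : y ∈ s := h y ((PySem.Set.mem_ofList xs y).mp hy)
    simpa using hys
  rw [this, List.append_nil]

theorem pvStepRow_keys (data : List (List String)) (keywords : List String)
    (res : PySem.Dict String (List String)) (row : List String)
    (h : res.keys = (pvT data keywords).keys) :
    (pvStepRow data keywords res row).keys = (pvT data keywords).keys := by
  unfold pvStepRow
  rw [PySem.Dict.keys_foldl_modify_key (pvT data keywords).items (fun p => p.1) []
    (fun _ p => (fun l => l ++ [(PySem.List.pyGet? row p.2).getD ""])) res, h]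
  exact pvSet_update_self _ _ (fun x hx => hx)

theorem pvFold_keys (data : List (List String)) (keywords : List String) :
    ∀ (rows : List (List String)) (res : PySem.Dict String (List String)),
      res.keys = (pvT data keywords).keys →
      (rows.foldl (pvStepRow data keywords) res).keys = (pvT data keywords).keys := by
  intro rows
  induction rows with
  | nil => intro res h; exact h
  | cons row rest ih =>
      intro res h
      rw [List.foldl_cons]
      exact ih _ (pvStepRow_keys data keywords res row h)

theorem pvInner_absent (row : List String) :
    ∀ (l : List (String × Int)) (res : PySem.Dict String (List String)) (k : String),
      k ∉ l.map (fun p => p.1) →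
      (l.foldl (fun res p => res.modify p.1 [] (fun v => v ++ [(PySem.List.pyGet? row p.2).getD ""])) res).getD k []
        = res.getD k [] := by
  intro l
  induction l with
  | nil => intro res k _; rfl
  | cons p0 rest ih =>
      intro res k hk
      rw [List.foldl_cons]
      have hne : k ≠ p0.1 := by
        intro he; exact hk (by simp [he])
      rw [ih _ k (fun hm => hk (by simp [hm]))]
      rw [PySem.Dict.getD_modify, if_neg hne]

theorem pvInner_getD (row : List String) :
    ∀ (l : List (String × Int)) (res : PySem.Dict String (List String)) (k : String),
      (l.map (fun p => p.1)).Nodup →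
      (l.foldl (fun res p => res.modify p.1 [] (fun v => v ++ [(PySem.List.pyGet? row p.2).getD ""])) res).getD k []
        = match l.find? (fun p => p.1 == k) with
          | some p => res.getD k [] ++ [(PySem.List.pyGet? row p.2).getD ""]
          | none => res.getD k [] := by
  intro l
  induction l with
  | nil => intro res k _; rfl
  | cons p0 rest ih =>
      intro res k hnd
      rw [List.foldl_cons]
      rw [List.map_cons, List.nodup_cons] at hnd
      by_cases hk : p0.1 = k
      · have hfind : List.find? (fun p => p.1 == k) (p0 :: rest) = some p0 := by
          rw [List.find?_cons_of_pos]
          simp [hk]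
        rw [hfind]
        have habs : k ∉ rest.map (fun p => p.1) := by
          rw [← hk]; exact hnd.1
        rw [pvInner_absent row rest _ k habs]
        subst hk
        rw [PySem.Dict.getD_modify_self]
      · have hfind : List.find? (fun p => p.1 == k) (p0 :: rest) =
            List.find? (fun p => p.1 == k) rest := by
          rw [List.find?_cons_of_neg]
          simp [hk]
        rw [hfind, ih _ k hnd.2]
        have : (res.modify p0.1 [] (fun v => v ++ [(PySem.List.pyGet? row p0.2).getD ""])).getD k []
            = res.getD k [] := by
          rw [PySem.Dict.getD_modify, if_neg (fun he => hk he.symm)]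
        rw [this]

theorem pvFold_getD (data : List (List String)) (keywords : List String) :
    ∀ (rows : List (List String)) (res : PySem.Dict String (List String)) (k : String),
      (rows.foldl (pvStepRow data keywords) res).getD k []
        = match (pvT data keywords).items.find? (fun p => p.1 == k) with
          | some p => res.getD k [] ++ rows.map (fun row => (PySem.List.pyGet? row p.2).getD "")
          | none => res.getD k [] := by
  intro rows
  induction rows with
  | nil =>
      intro res k
      cases (pvT data keywords).items.find? (fun p => p.1 == k) <;> simp
  | cons row rest ih =>
      intro res k
      rw [List.foldl_cons, ih]
      have hstep := pvInner_getD row (pvT data keywords).items res k (pvT_nodup data keywords)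
      show _ = _
      cases hf : (pvT data keywords).items.find? (fun p => p.1 == k) with
      | none =>
          rw [hf] at hstep
          show (pvStepRow data keywords res row).getD k [] = res.getD k []
          unfold pvStepRow
          rw [hstep]
      | some p =>
          have : (pvStepRow data keywords res row).getD k []
              = res.getD k [] ++ [(PySem.List.pyGet? row p.2).getD ""] := by
            unfold pvStepRow
            rw [hstep, hf]
          rw [this]
          simp [List.append_assoc]

theorem pvGetD_eq (data : List (List String)) (keywords : List String) (k : String) :
    (pvA data keywords).getD k []
      = ((pvRows data).foldl (pvStepRow data keywords) (pvR0 data keywords)).getD k [] := by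
  rw [PySem.Dict.getD_eq_get?_getD, pvA_get?, pvFold_getD]
  have hget : (pvT data keywords).get? k
      = ((pvT data keywords).items.find? (fun p => p.1 == k)).map (fun p => p.2) := rfl
  cases hf : (pvT data keywords).items.find? (fun p => p.1 == k) with
  | none => simp [hget, hf, pvR0_getD]
  | some p => simp [hget, hf, pvR0_getD, pvCol]

theorem pvMain (data : List (List String)) (keywords : List String) :
    build_dict data keywords = build_dict_alt data keywords := by
  rw [pvA_eq, pvB_eq]
  have hknA : (pvA data keywords).keys.Nodup := by
    rw [pvA_keys]; exact pvT_nodup data keywords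
  have hkR : ((pvRows data).foldl (pvStepRow data keywords) (pvR0 data keywords)).keys
      = (pvT data keywords).keys :=
    pvFold_keys data keywords (pvRows data) (pvR0 data keywords) (pvR0_keys data keywords)
  have hknR : ((pvRows data).foldl (pvStepRow data keywords) (pvR0 data keywords)).keys.Nodup := by
    rw [hkR]; exact pvT_nodup data keywords
  rw [PySem.Dict.items_eq_map_keys _ hknA ([] : List String),
      PySem.Dict.items_eq_map_keys _ hknR ([] : List String),
      pvA_keys, hkR]
  apply List.map_congr_left
  intro k _
  rw [pvGetD_eq]

-- ===== VERDICT (by name: the statement is the Claim_ definition above) =====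
theorem build_dict_spec : Claim_equal_build_dict := by
  intro data keywords _ _
  show build_dict data keywords = build_dict_alt data keywords
  exact pvMain data keywords
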